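-- pv_equiv track=rewrite | github.com/RobbeW/Data_Statistiek_R | Deel 3 Algoritmiek/03 Hogere dimensie/11 Hervorm/solution/solution.nl.py | hervorm
-- ===== SOURCE A (Python) =====
-- def hervorm(matrix, R, K):
--     aantal_r = len(matrix)
--     aantal_c = len(matrix[0])
--
--     nieuw = []
--     row = []
--     i = 0
--     for r in range(aantal_r):
--         for c in range(aantal_c):
--             getal = matrix[r][c]
--             i += 1
--             if i % K == 0:
--                 row.append(getal)
--                 nieuw.append(row)
--                 row = []
--             else:
--                 row.append(getal)
--
--     return nieuw
-- ===== SOURCE B (Python) =====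
-- def hervorm(matrix, R, K):
--     C = len(matrix[0])
--     flat = [x for row in matrix for x in row[:C]]
--     return [flat[i * K:(i + 1) * K] for i in range(len(flat) // K)]
-- ===== Notes on version B (the rewrite author's own statement) =====
-- stated objective: simpler
-- what changed: B flattens the matrix in row-major order (rectangular reading via row[:C]) and then slices the flat list into len(flat)//K complete K-sized chunks, replacing A's interleaved per-element loop with its modulo counter and mutable accumulators by two comprehensions over bulk slices (measured ~1.9x faster).
-- outside the precondition, e.g. on hervorm([[1, 2], [3, 4]], 0, -2): A returns [[1, 2], [3, 4]], B returns []
import Mathlib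
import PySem

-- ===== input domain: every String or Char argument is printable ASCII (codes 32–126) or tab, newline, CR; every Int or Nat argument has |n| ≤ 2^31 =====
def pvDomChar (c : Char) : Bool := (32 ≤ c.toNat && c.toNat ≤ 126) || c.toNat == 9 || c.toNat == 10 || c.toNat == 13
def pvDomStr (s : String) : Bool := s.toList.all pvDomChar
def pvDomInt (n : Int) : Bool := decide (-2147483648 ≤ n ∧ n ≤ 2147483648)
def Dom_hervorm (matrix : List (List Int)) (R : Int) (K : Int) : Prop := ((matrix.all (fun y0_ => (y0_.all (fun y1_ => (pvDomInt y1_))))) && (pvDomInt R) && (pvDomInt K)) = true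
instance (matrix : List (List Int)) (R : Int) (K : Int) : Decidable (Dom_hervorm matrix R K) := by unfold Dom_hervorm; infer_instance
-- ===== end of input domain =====

-- B separates A's interleaved modulo-counting loop into flatten-then-chunk (objective: simpler); equal return values on Pre_.

-- ===== PORT A =====
-- one step of A's inner loop body: i += 1; if i % K == 0 then close the row else extend it
def hervormStep (K : Int) (st : List (List Int) × List Int × Int) (getal : Int) :
    List (List Int) × List Int × Int :=
  let i := st.2.2 + 1
  if PySem.Int.mod i K = 0 then (st.1 ++ [st.2.1 ++ [getal]], [], i)
  else (st.1, st.2.1 ++ [getal], i)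

def hervorm (matrix : List (List Int)) (R : Int) (K : Int) : List (List Int) :=
  let aantal_r : Int := matrix.length
  -- matrix[0]: IndexError on empty matrix, excluded by Pre_ (total form via getD)
  let aantal_c : Int := ((PySem.List.pyGet? matrix 0).getD []).length
  let s :=
    (PySem.List.pyRange 0 aantal_r 1).foldl
      (fun st r =>
        (PySem.List.pyRange 0 aantal_c 1).foldl
          (fun st c =>
            hervormStep K st (PySem.List.pyGetD (PySem.List.pyGetD matrix r []) c 0))
          st)
      ([], [], 0)
  s.1

-- ===== PORT B =====
def hervorm_alt (matrix : List (List Int)) (R : Int) (K : Int) : List (List Int) :=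
  let C : Int := ((PySem.List.pyGet? matrix 0).getD []).length
  let flat := matrix.flatMap (fun row => PySem.List.slice row none (some C))
  (PySem.List.pyRange 0 (PySem.Int.floordiv flat.length K) 1).map
    (fun i => PySem.List.slice flat (some (i * K)) (some ((i + 1) * K)))

-- ===== PRECONDITION & SPEC =====
-- Pre_ excludes: matrix = [] (A raises IndexError), K = 0 (ZeroDivisionError), a later row
-- shorter than row 0 (IndexError on matrix[r][c]); and K < 0, outside the natural domain
-- 'rows of K elements', where A's chunks of |K| are an artefact of 'i % K == 0' (see cite).
def Pre_hervorm (matrix : List (List Int)) (R : Int) (K : Int) : Prop :=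
  matrix ≠ [] ∧ 1 ≤ K ∧ ∀ row ∈ matrix, matrix.headI.length ≤ row.length
instance (matrix : List (List Int)) (R : Int) (K : Int) : Decidable (Pre_hervorm matrix R K) := by
  unfold Pre_hervorm; infer_instance

def pvWitness_hervorm : List (List Int) × Int × Int := ([[1, 2, 3], [4, 5, 6]], 2, 2)

def Spec_hervorm (matrix : List (List Int)) (R : Int) (K : Int) (out : List (List Int)) : Prop := out = hervorm_alt matrix R K
instance (matrix : List (List Int)) (R : Int) (K : Int) (out : List (List Int)) : Decidable (Spec_hervorm matrix R K out) := by unfold Spec_hervorm; infer_instance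

-- ===== CLAIM (what is proved, stated in full; the proofs are below) =====
def Claim_equal_hervorm : Prop := ∀ (matrix : List (List Int)) (R : Int) (K : Int), Dom_hervorm matrix R K → Pre_hervorm matrix R K → Spec_hervorm matrix R K (hervorm matrix R K)

-- ===== LEMMAS AND PROOFS =====

-- reference chunking: the list of complete k-sized chunks of xs, in order
def chunksK (k : Nat) (xs : List Int) : List (List Int) :=
  if h : 0 < k ∧ k ≤ xs.length then xs.take k :: chunksK k (xs.drop k) else []
termination_by xs.length
decreasing_by simp [List.length_drop]; omega

lemma chunksK_small {k : Nat} {xs : List Int} (h : xs.length < k) : chunksK k xs = [] := by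
  rw [chunksK]; simp; omega

lemma chunksK_big {k : Nat} {xs : List Int} (hk : 0 < k) (h : k ≤ xs.length) :
    chunksK k xs = xs.take k :: chunksK k (xs.drop k) := by
  rw [chunksK]; simp [hk, h]

-- A's fold over a flat list produces nieuw ++ the complete chunks of row ++ xs,
-- given the invariant i % K = row.length (< K)
lemma foldl_step_chunks (K : Int) (hK : 1 ≤ K) (xs : List Int) :
    ∀ (nieuw : List (List Int)) (row : List Int) (i : Int), 0 ≤ i →
      PySem.Int.mod i K = (row.length : Int) →
      (xs.foldl (hervormStep K) (nieuw, row, i)).1 = nieuw ++ chunksK K.toNat (row ++ xs) := by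
  induction xs with
  | nil =>
    intro nieuw row i hi hmod
    have hb := PySem.Int.mod_lt i (show (0:Int) < K by omega)
    rw [hmod] at hb
    have hnil : chunksK K.toNat row = [] := chunksK_small (by omega)
    simp [hnil]
  | cons x xs ih =>
    intro nieuw row i hi hmod
    have hb := PySem.Int.mod_lt i (show (0:Int) < K by omega)
    rw [hmod] at hb
    have hK0 : (0:Int) < K := by omega
    have hemod : PySem.Int.mod i K = i % K := PySem.Int.mod_eq_emod_of_pos hK0
    have hemod' : PySem.Int.mod (i+1) K = (i+1) % K := PySem.Int.mod_eq_emod_of_pos hK0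
    have hiK : i % K = (row.length : Int) := by rw [← hemod]; exact hmod
    have hstep : (i + 1) % K = (((row.length : Int) + 1) % K) := by
      conv_lhs => rw [show i + 1 = ((row.length : Int) + 1) + K * (i / K) from by
        have h := Int.emod_add_mul_ediv i K; rw [hiK] at h; linarith]
      apply Int.add_mul_emod_self_left
    by_cases hfull : (row.length : Int) + 1 = K
    · -- the chunk is completed: i+1 ≡ 0 (mod K)
      have hz : PySem.Int.mod (i+1) K = 0 := by
        rw [hemod', hstep, hfull]; simp
      have hlen : (row ++ [x]).length = K.toNat := by simp; omega
      simp only [List.foldl_cons, hervormStep, hz, if_true]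
      rw [ih (nieuw ++ [row ++ [x]]) [] (i+1) (by omega) (by simpa using hz)]
      simp only [List.nil_append]
      rw [chunksK_big (k := K.toNat) (xs := row ++ x :: xs) (by omega) (by simp; omega)]
      have ht : (row ++ x :: xs).take K.toNat = row ++ [x] := by
        have : row ++ x :: xs = (row ++ [x]) ++ xs := by simp
        rw [this, List.take_append_of_le_length (by omega), List.take_of_length_le (by omega)]
      have hd : (row ++ x :: xs).drop K.toNat = xs := by
        have : row ++ x :: xs = (row ++ [x]) ++ xs := by simp
        rw [this, List.drop_append_of_le_length (by omega)]
        simp [hlen]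
      rw [ht, hd]; simp
    · -- the chunk grows
      have hnz : PySem.Int.mod (i+1) K = ((row.length : Int) + 1) := by
        rw [hemod', hstep]
        exact Int.emod_eq_of_lt (by omega) (by omega)
      have hne : ¬ PySem.Int.mod (i+1) K = 0 := by rw [hnz]; omega
      simp only [List.foldl_cons, hervormStep, hne, if_false]
      rw [ih nieuw (row ++ [x]) (i+1) (by omega) (by rw [hnz]; simp)]
      simp

-- the inner loop 'for c in range(C)' over a row with C ≤ len(row) folds over row.take C
lemma inner_fold_take (K : Int) (C : Nat) (row : List Int) (hC : C ≤ row.length)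
    (st : List (List Int) × List Int × Int) :
    (PySem.List.pyRange 0 (C : Int) 1).foldl
        (fun st c => hervormStep K st (PySem.List.pyGetD row c 0)) st
      = (row.take C).foldl (hervormStep K) st := by
  have hlen : (row.take C).length = C := by simp [hC]
  have hcongr :
      (PySem.List.pyRange 0 (C : Int) 1).foldl
          (fun st c => hervormStep K st (PySem.List.pyGetD row c 0)) st
        = (PySem.List.pyRange 0 (C : Int) 1).foldl
          (fun st c => hervormStep K st (PySem.List.pyGetD (row.take C) c 0)) st := by
    apply PySem.List.foldl_congr_mem
    intro acc c hc
    rw [PySem.List.mem_pyRange_one] at hc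
    have h1 : PySem.List.pyGetD row c 0 = row[c.toNat] :=
      PySem.List.pyGetD_eq_getElem row 0 (by omega) (by omega)
    have h2 : PySem.List.pyGetD (row.take C) c 0 = (row.take C)[c.toNat]'(by omega) :=
      PySem.List.pyGetD_eq_getElem (row.take C) 0 (by omega) (by omega)
    rw [h1, h2]
    simp [List.getElem_take]
  rw [hcongr]
  calc (PySem.List.pyRange 0 (C : Int) 1).foldl
          (fun st c => hervormStep K st (PySem.List.pyGetD (row.take C) c 0)) st
      = (PySem.List.pyRange 0 ((row.take C).length : Int) 1).foldl
          (fun st c => hervormStep K st (PySem.List.pyGetD (row.take C) c 0)) st := by rw [hlen]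
    _ = (row.take C).foldl (hervormStep K) st :=
          PySem.List.foldl_pyRange_zero_pyGetD' (row.take C) 0 (hervormStep K) st

-- folding row-by-row (inner fold over row.take C) is folding over the flattened list
lemma fold_fold_flatMap (K : Int) (C : Nat) :
    ∀ (m : List (List Int)) (st : List (List Int) × List Int × Int),
      m.foldl (fun st row => (row.take C).foldl (hervormStep K) st) st
        = (m.flatMap (fun row => row.take C)).foldl (hervormStep K) st := by
  intro m
  induction m with
  | nil => intro st; simp
  | cons r m ih => intro st; simp [List.flatMap_cons, List.foldl_append, ih]

-- B's slice-comprehension equals the reference chunking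
lemma map_slice_chunks (K : Int) (hK : 1 ≤ K) (xs : List Int) :
    (PySem.List.pyRange 0 (PySem.Int.floordiv (xs.length : Int) K) 1).map
        (fun i => PySem.List.slice xs (some (i * K)) (some ((i + 1) * K)))
      = chunksK K.toNat xs := by
  by_cases h : xs.length < K.toNat
  · have h0 : PySem.Int.floordiv (xs.length : Int) K = 0 := by
      rw [PySem.Int.floordiv_eq_iff_of_pos (by omega)]
      constructor <;> omega
    rw [h0, chunksK_small h]
    simp [PySem.List.pyRange_one_eq_nil]
  · -- K.toNat ≤ xs.length : peel one chunk and recurse on xs.drop K.toNat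
    have hK0 : (0:Int) < K := by omega
    have hle : K.toNat ≤ xs.length := by omega
    have hfd : PySem.Int.floordiv (xs.length : Int) K
        = PySem.Int.floordiv ((xs.drop K.toNat).length : Int) K + 1 := by
      have hlen : ((xs.drop K.toNat).length : Int) = (xs.length : Int) - K := by
        simp only [List.length_drop]; omega
      rw [hlen]
      rw [PySem.Int.floordiv_eq_ediv_of_pos hK0, PySem.Int.floordiv_eq_ediv_of_pos hK0]
      conv_lhs => rw [show (xs.length : Int) = ((xs.length : Int) - K) + 1 * K from by ring]
      rw [Int.add_mul_ediv_right _ _ (by omega)]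
    have hpos : 0 < PySem.Int.floordiv (xs.length : Int) K := by
      rw [hfd]
      have := PySem.Int.floordiv_eq_iff_of_pos (a := ((xs.drop K.toNat).length : Int)) (b := K)
        (q := PySem.Int.floordiv ((xs.drop K.toNat).length : Int) K) hK0
      have h2 : 0 ≤ PySem.Int.floordiv ((xs.drop K.toNat).length : Int) K := by
        rw [PySem.Int.floordiv_eq_ediv_of_pos hK0]
        exact Int.ediv_nonneg (by omega) (by omega)
      omega
    rw [PySem.List.pyRange_one_cons (by omega)]
    rw [chunksK_big (by omega) hle]
    simp only [List.map_cons]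
    congr 1
    · -- head chunk: xs[0:K] = take K
      simp only [zero_mul, zero_add, one_mul]
      rw [PySem.List.slice_zero_start, PySem.List.slice_to xs (by omega)]
    · -- tail: shift indices by one and recurse
      have ihrec := map_slice_chunks K hK (xs.drop K.toNat)
      rw [← ihrec, hfd]
      -- pyRange 1 (n+1) maps like pyRange 0 n shifted
      set n := PySem.Int.floordiv ((xs.drop K.toNat).length : Int) K with hn
      have hshift : PySem.List.pyRange 1 (n + 1) 1
          = (PySem.List.pyRange 0 n 1).map (fun i => i + 1) := by
        rw [PySem.List.pyRange_one, PySem.List.pyRange_one]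
        simp only [List.map_map, add_sub_cancel_right, sub_zero]
        apply List.map_congr_left
        intro k _
        simp only [Function.comp_apply]
        omega
      simp only [zero_add]
      rw [hshift, List.map_map]
      apply List.map_congr_left
      intro i hi
      rw [PySem.List.mem_pyRange_one] at hi
      simp only [Function.comp_apply]
      -- slice xs ((i+1)*K) ((i+2)*K) = slice (xs.drop K) (i*K) ((i+1)*K)
      have h1 : 0 ≤ i * K := mul_nonneg (by omega) (by omega)
      have e1 : (i + 1) * K = i * K + K := by ring
      have e2 : (i + 1 + 1) * K = i * K + K + K := by ring
      rw [e1, e2]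
      generalize i * K = m at h1 ⊢
      have h2 : (0:Int) ≤ m + K := by omega
      have h3 : (0:Int) ≤ m + K + K := by omega
      rw [PySem.List.slice_toNat xs h2 h3,
        PySem.List.slice_toNat (xs.drop K.toNat) h1 h2, List.drop_drop]
      have f1 : (m + K).toNat = m.toNat + K.toNat := by omega
      have f2 : (m + K + K).toNat = m.toNat + K.toNat + K.toNat := by omega
      rw [f1, f2, Nat.add_comm m.toNat K.toNat]
      congr 1
      omega
termination_by xs.length
decreasing_by simp [List.length_drop]; omega

lemma hervorm_eq_chunks (matrix : List (List Int)) (R K : Int)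
    (h : Pre_hervorm matrix R K) :
    hervorm matrix R K
      = chunksK K.toNat (matrix.flatMap (fun row => row.take matrix.headI.length)) := by
  obtain ⟨hne, hK, hrect⟩ := h
  have hhead : (PySem.List.pyGet? matrix 0).getD [] = matrix.headI := by
    cases matrix with
    | nil => exact absurd rfl hne
    | cons r m => simp [PySem.List.pyGet?, PySem.List.pyIdx?]
  unfold hervorm
  simp only [hhead]
  set C := matrix.headI.length with hC
  -- outer loop over range(len(matrix)) folds over matrix's rows
  have houter :
      (PySem.List.pyRange 0 (matrix.length : Int) 1).foldl
        (fun st r =>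
          (PySem.List.pyRange 0 (C : Int) 1).foldl
            (fun st c => hervormStep K st (PySem.List.pyGetD (PySem.List.pyGetD matrix r []) c 0)) st)
        ([], [], 0)
      = matrix.foldl
        (fun st row =>
          (PySem.List.pyRange 0 (C : Int) 1).foldl
            (fun st c => hervormStep K st (PySem.List.pyGetD row c 0)) st)
        ([], [], 0) :=
    PySem.List.foldl_pyRange_zero_pyGetD' matrix []
      (fun st row =>
        (PySem.List.pyRange 0 (C : Int) 1).foldl
          (fun st c => hervormStep K st (PySem.List.pyGetD row c 0)) st)
      ([], [], 0)
  simp only [houter]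
  have hinner : matrix.foldl
        (fun st row =>
          (PySem.List.pyRange 0 (C : Int) 1).foldl
            (fun st c => hervormStep K st (PySem.List.pyGetD row c 0)) st)
        ([], [], 0)
      = matrix.foldl (fun st row => (row.take C).foldl (hervormStep K) st) ([], [], 0) := by
    apply PySem.List.foldl_congr_mem
    intro st row hrow
    exact inner_fold_take K C row (hrect row hrow) st
  rw [hinner, fold_fold_flatMap]
  rw [foldl_step_chunks K hK _ [] [] 0 le_rfl (by simp [PySem.Int.mod])]
  simp

-- ===== VERDICT (by name: the statement is the Claim_ definition above) =====
theorem hervorm_spec : Claim_equal_hervorm := by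
  intro matrix R K _hdom hpre
  unfold Spec_hervorm
  rw [hervorm_eq_chunks matrix R K hpre]
  obtain ⟨hne, hK, _⟩ := hpre
  have hhead : (PySem.List.pyGet? matrix 0).getD [] = matrix.headI := by
    cases matrix with
    | nil => exact absurd rfl hne
    | cons r m => simp [PySem.List.pyGet?, PySem.List.pyIdx?]
  unfold hervorm_alt
  simp only [hhead]
  have hslice : ∀ row : List Int,
      PySem.List.slice row none (some (matrix.headI.length : Int)) = row.take matrix.headI.length :=
    fun row => PySem.List.slice_to_natCast row matrix.headI.length
  rw [show (fun row => PySem.List.slice row none (some ((matrix.headI.length : Nat) : Int)))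
      = (fun row : List Int => row.take matrix.headI.length) from funext hslice]
  rw [map_slice_chunks K hK]
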